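-- pv_equiv track=rewrite | github.com/asifhussain60/CORTEX | cortex-brain/archives/obsolete-content-20251116_092210/dist/cortex-user-v1.0.0/src/plugins/platform_switch_plugin.py | _count_git_changes
-- ===== SOURCE A (Python) =====
-- def _count_git_changes(git_output: str) -> int:
--     """Count number of files changed from git output."""
--     try:
--         # Look for "N files changed"
--         for line in git_output.split("\n"):
--             if "files changed" in line or "file changed" in line:
--                 parts = line.split()
--                 if parts and parts[0].isdigit():
--                     return int(parts[0])
--         return 0
--     except:
--         return 0
-- ===== SOURCE B (Python) =====
-- import re
--
-- # One regex over the whole output: a line whose first whitespace-separated token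
-- # is a run of digits, with "file changed"/"files changed" later on the same line.
-- _CHANGES_RE = re.compile(r"^[ \t\r]*(\d+)[ \t\r].*files? changed", re.MULTILINE)
--
-- def _count_git_changes(git_output: str) -> int:
--     """Count number of files changed from git output."""
--     m = _CHANGES_RE.search(git_output)
--     return int(m.group(1)) if m else 0
-- ===== Notes on version B (the rewrite author's own statement) =====
-- stated objective: idiomatic
-- what changed: Replaces the line-by-line loop with token splitting and early return by a single anchored multiline regex over the whole output (leftmost match = first matching line).
import Mathlib
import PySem

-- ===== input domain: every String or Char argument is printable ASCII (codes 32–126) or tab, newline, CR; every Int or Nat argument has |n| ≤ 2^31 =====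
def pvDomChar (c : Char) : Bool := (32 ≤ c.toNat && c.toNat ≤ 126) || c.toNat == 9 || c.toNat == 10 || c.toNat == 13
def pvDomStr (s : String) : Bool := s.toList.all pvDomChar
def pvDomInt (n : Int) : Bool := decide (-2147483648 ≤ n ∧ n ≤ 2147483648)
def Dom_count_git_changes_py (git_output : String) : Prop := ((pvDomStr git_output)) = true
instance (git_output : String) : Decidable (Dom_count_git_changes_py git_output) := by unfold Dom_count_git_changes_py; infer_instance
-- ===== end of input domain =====

-- B replaces A's line loop (split lines, split tokens, early return) with one anchored
-- multiline regex search over the whole output; return value only, no side effects.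

-- ===== PORT A =====
-- A's for-loop with early return: structural recursion over the split lines.
def countGitChangesGo : List String → Int
  | [] => 0
  | line :: rest =>
    if PySem.Str.isIn "files changed" line || PySem.Str.isIn "file changed" line then
      match PySem.Str.split₀ line with
      | [] => countGitChangesGo rest
      | p :: _ =>
        if PySem.Str.strIsdigit p then
          -- int(parts[0]); the surrounding try/except returns 0 on failure
          (PySem.Int.ofStr? p).getD 0
        else countGitChangesGo rest
    else countGitChangesGo rest

def count_git_changes_py (git_output : String) : Int :=
  countGitChangesGo ((PySem.Str.split? git_output "\n").getD [])

-- ===== PORT B =====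
-- Hand port of Source B's compiled regex r"^[ \t\r]*(\d+)[ \t\r].*files? changed" with
-- re.MULTILINE and re.search (PySem has no regex); exact on this pattern, see the
-- comments at each piece.

-- the character class [ \t\r]
def isWSChar (c : Char) : Bool := c == ' ' || c == '\t' || c == '\r'

-- does "files? changed" match at this position?
def markerAt (cs : List Char) : Bool :=
  "file changed".toList.isPrefixOf cs || "files changed".toList.isPrefixOf cs

-- ".*files? changed": the marker occurs at or after this position, before the end of
-- the line ('.' never matches '\n')
def markerSearch : List Char → Bool
  | [] => false
  | c :: rest => if c == '\n' then false else markerAt (c :: rest) || markerSearch rest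

-- try the whole pattern at one position ('^' already checked by the caller).
-- Greedy "(\d+)" then "[ \t\r]": backtracking the digit run can never help (the char
-- given back is a digit, not in [ \t\r]), so greedy-without-backtracking is exact.
-- int(m.group(1)): the group is a nonempty digit run, so ofChars? is `some` here and
-- the .getD 0 branch is the dead ValueError case.
def matchAt (cs : List Char) : Option Int :=
  let t := cs.dropWhile isWSChar
  match t.takeWhile PySem.Chars.isdigit, t.dropWhile PySem.Chars.isdigit with
  | [], _ => none
  | _ :: _, [] => none
  | e :: ds, c :: tail =>
    if isWSChar c && markerSearch tail then some ((PySem.Int.ofChars? (e :: ds)).getD 0)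
    else none

-- re.search of a '^'-anchored MULTILINE pattern: try each line start, left to right
def reSearch : List Char → Bool → Option Int
  | [], _ => none
  | c :: cs, atStart =>
    match (if atStart then matchAt (c :: cs) else none) with
    | some n => some n
    | none => reSearch cs (c == '\n')

def count_git_changes_py_alt (git_output : String) : Int :=
  match reSearch git_output.toList true with
  | some n => n
  | none => 0

-- ===== PRECONDITION & SPEC =====
def Spec_count_git_changes_py (git_output : String) (out : Int) : Prop := out = count_git_changes_py_alt git_output
instance (git_output : String) (out : Int) : Decidable (Spec_count_git_changes_py git_output out) := by unfold Spec_count_git_changes_py; infer_instance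

-- ===== CLAIM (what is proved, stated in full; the proofs are below) =====
def Claim_equal_count_git_changes_py : Prop := ∀ (git_output : String), Dom_count_git_changes_py git_output → Spec_count_git_changes_py git_output (count_git_changes_py git_output)

-- ===== LEMMAS AND PROOFS =====

-- the lines of a char list, as str.split("\n") produces them
def linesOf : List Char → List (List Char)
  | [] => [[]]
  | c :: rest =>
    if c = '\n' then [] :: linesOf rest
    else (c :: (linesOf rest).headI) :: (linesOf rest).tail

-- "\n".join of the lines
def interNL : List (List Char) → List Char
  | [] => []
  | [l] => l
  | l :: ls => l ++ '\n' :: interNL ls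

-- A's per-line step, at char level, as an Option (some = early return)
def lineStepA (l : List Char) : Option Int :=
  if PySem.Chars.isIn "files changed".toList l || PySem.Chars.isIn "file changed".toList l then
    match PySem.Chars.split₀ l with
    | [] => none
    | p :: _ => if PySem.Chars.strIsdigit p then some ((PySem.Int.ofChars? p).getD 0) else none
  else none

-- first `some` of matchAt over a list of lines
def firstMatch : List (List Char) → Option Int
  | [] => none
  | l :: ls => match matchAt l with | some n => some n | none => firstMatch ls

theorem linesOf_ne_nil (cs : List Char) : linesOf cs ≠ [] := by
  induction cs with
  | nil => simp [linesOf]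
  | cons c rest ih => simp only [linesOf]; split <;> simp

theorem interNL_cons_cons (l m : List Char) (ls : List (List Char)) :
    interNL (l :: m :: ls) = l ++ '\n' :: interNL (m :: ls) := rfl

theorem interNL_linesOf (cs : List Char) : interNL (linesOf cs) = cs := by
  induction cs with
  | nil => rfl
  | cons c rest ih =>
    obtain ⟨L, Ls, hL⟩ := List.exists_cons_of_ne_nil (linesOf_ne_nil rest)
    simp only [linesOf]
    split
    · rename_i h
      subst h
      rw [hL, interNL_cons_cons, ← hL, ih]
      rfl
    · rw [hL]
      simp only [List.headI, List.tail]
      cases Ls with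
      | nil => simp only [interNL]; rw [← ih, hL]; rfl
      | cons m ms =>
        rw [interNL_cons_cons, ← ih, hL, interNL_cons_cons]
        simp

theorem not_nl_mem_linesOf {cs l : List Char} (h : l ∈ linesOf cs) : '\n' ∉ l := by
  induction cs generalizing l with
  | nil => simp [linesOf] at h; simp [h]
  | cons c rest ih =>
    obtain ⟨L, Ls, hL⟩ := List.exists_cons_of_ne_nil (linesOf_ne_nil rest)
    simp only [linesOf] at h
    split at h
    · rcases List.mem_cons.mp h with h | h
      · simp [h]
      · exact ih h
    · rename_i hc
      rw [hL] at h
      simp only [List.headI, List.tail] at h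
      rcases List.mem_cons.mp h with h | h
      · subst h
        intro hm
        rcases List.mem_cons.mp hm with h | h
        · exact hc h.symm
        · exact ih (by rw [hL]; exact List.mem_cons_self) h
      · exact ih (by rw [hL]; exact List.mem_cons_of_mem _ h)

theorem mem_of_mem_linesOf {cs l : List Char} (h : l ∈ linesOf cs) {c : Char} (hc : c ∈ l) : c ∈ cs := by
  induction cs generalizing l with
  | nil => simp [linesOf] at h; subst h; simp at hc
  | cons a rest ih =>
    obtain ⟨L, Ls, hL⟩ := List.exists_cons_of_ne_nil (linesOf_ne_nil rest)
    simp only [linesOf] at h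
    split at h
    · rcases List.mem_cons.mp h with h | h
      · subst h; simp at hc
      · exact List.mem_cons_of_mem _ (ih h hc)
    · rw [hL] at h
      simp only [List.headI, List.tail] at h
      rcases List.mem_cons.mp h with h | h
      · subst h
        rcases List.mem_cons.mp hc with h | h
        · simp [h]
        · exact List.mem_cons_of_mem _ (ih (by rw [hL]; exact List.mem_cons_self) h)
      · exact List.mem_cons_of_mem _ (ih (by rw [hL]; exact List.mem_cons_of_mem _ h) hc)

theorem splitOn_go_newline (fuel : Nat) (l cur : List Char) (acc : List (List Char))
    (h : l.length ≤ fuel) :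
    PySem.Chars.splitOn.go ['\n'] fuel l cur acc =
      acc.reverse ++ (cur.reverse ++ (linesOf l).headI) :: (linesOf l).tail := by
  induction fuel generalizing l cur acc with
  | zero =>
    interval_cases hl : l.length
    have : l = [] := List.eq_nil_of_length_eq_zero hl
    subst this
    simp [PySem.Chars.splitOn.go, linesOf]
  | succ fuel ih =>
    cases l with
    | nil => simp [PySem.Chars.splitOn.go, linesOf]
    | cons c rest =>
      obtain ⟨L, Ls, hL⟩ := List.exists_cons_of_ne_nil (linesOf_ne_nil rest)
      simp only [PySem.Chars.splitOn.go]
      by_cases hc : c = '\n'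
      · subst hc
        rw [if_pos (by simp [List.isPrefixOf])]
        rw [ih _ _ _ (by simpa using Nat.le_of_succ_le_succ (by simpa using h))]
        simp [linesOf, hL]
      · rw [if_neg (by simp [List.isPrefixOf]; exact fun hh => hc hh.symm)]
        rw [ih _ _ _ (by simpa using Nat.le_of_succ_le_succ (by simpa using h))]
        simp [linesOf, hc, hL]

theorem splitOn_newline (cs : List Char) : PySem.Chars.splitOn cs ['\n'] = linesOf cs := by
  obtain ⟨L, Ls, hL⟩ := List.exists_cons_of_ne_nil (linesOf_ne_nil cs)
  rw [PySem.Chars.splitOn, splitOn_go_newline _ _ _ _ (by omega)]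
  simp [hL]

-- marker prefix ignores everything from a '\n' on
theorem isPrefixOf_append_nl {m : List Char} (hm : '\n' ∉ m) (s v : List Char) :
    m.isPrefixOf (s ++ '\n' :: v) = m.isPrefixOf s := by
  induction m generalizing s with
  | nil => simp
  | cons a m' ih =>
    cases s with
    | nil =>
      simp only [List.nil_append, List.isPrefixOf]
      have h1 : (a == '\n') = false := by
        simp only [beq_eq_false_iff_ne, ne_eq]
        exact fun h => hm (h ▸ List.mem_cons_self)
      simp [h1]
    | cons b s' =>
      simp only [List.cons_append, List.isPrefixOf]
      rw [ih (by simp_all) s']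

theorem markerAt_append_nl (s v : List Char) :
    markerAt (s ++ '\n' :: v) = markerAt s := by
  unfold markerAt
  rw [isPrefixOf_append_nl (by decide) s v, isPrefixOf_append_nl (by decide) s v]

theorem markerSearch_append_nl {u : List Char} (hu : '\n' ∉ u) (v : List Char) :
    markerSearch (u ++ '\n' :: v) = markerSearch u := by
  induction u with
  | nil => simp [markerSearch]
  | cons c u' ih =>
    have hc : (c == '\n') = false := by
      simp only [beq_eq_false_iff_ne, ne_eq]; exact fun h => hu (h ▸ List.mem_cons_self)
    simp only [List.cons_append, markerSearch, hc]
    rw [← List.cons_append, markerAt_append_nl, ih (fun h => hu (List.mem_cons_of_mem _ h))]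

-- markerSearch is substring search for the two markers
theorem markerSearch_eq_isIn {u : List Char} (hu : '\n' ∉ u) :
    markerSearch u = (PySem.Chars.isIn "files changed".toList u || PySem.Chars.isIn "file changed".toList u) := by
  induction u with
  | nil => simp [markerSearch]; constructor <;> (rw [PySem.Chars.isIn_eq_false_iff]; simp)
  | cons c u' ih =>
    have hc : (c == '\n') = false := by
      simp only [beq_eq_false_iff_ne, ne_eq]; exact fun h => hu (h ▸ List.mem_cons_self)
    simp only [markerSearch, hc]
    rw [ih (fun h => hu (List.mem_cons_of_mem _ h))]
    rw [Bool.eq_iff_iff]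
    simp [markerAt, PySem.Chars.isIn_iff_infix, List.infix_cons_iff, List.isPrefixOf_iff_prefix]
    tauto

theorem reSearch_false_of_no_nl {u : List Char} (hu : '\n' ∉ u) : reSearch u false = none := by
  induction u with
  | nil => rfl
  | cons c u' ih =>
    have hc : (c == '\n') = false := by
      simp only [beq_eq_false_iff_ne, ne_eq]; exact fun h => hu (h ▸ List.mem_cons_self)
    simp only [reSearch, hc]
    exact ih (fun h => hu (List.mem_cons_of_mem _ h))

theorem reSearch_false_append_nl {u : List Char} (hu : '\n' ∉ u) (v : List Char) :
    reSearch (u ++ '\n' :: v) false = reSearch v true := by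
  induction u with
  | nil => simp [reSearch]
  | cons c u' ih =>
    have hc : (c == '\n') = false := by
      simp only [beq_eq_false_iff_ne, ne_eq]; exact fun h => hu (h ▸ List.mem_cons_self)
    simp only [List.cons_append, reSearch, hc]
    exact ih (fun h => hu (List.mem_cons_of_mem _ h))

theorem reSearch_true_append_nl {line : List Char} (h : '\n' ∉ line) (rest : List Char) :
    reSearch (line ++ '\n' :: rest) true =
      match matchAt (line ++ '\n' :: rest) with
      | some n => some n
      | none => reSearch rest true := by
  cases line with
  | nil => simp [reSearch]
  | cons c l =>
    have hc : (c == '\n') = false := by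
      simp only [beq_eq_false_iff_ne, ne_eq]; exact fun hh => h (hh ▸ List.mem_cons_self)
    simp only [List.cons_append, reSearch, hc, if_pos trivial]
    rw [reSearch_false_append_nl (fun hh => h (List.mem_cons_of_mem _ hh))]

theorem reSearch_true_no_nl {line : List Char} (h : '\n' ∉ line) :
    reSearch line true =
      match matchAt line with
      | some n => some n
      | none => none := by
  cases line with
  | nil => simp [reSearch, matchAt]
  | cons c l =>
    have hc : (c == '\n') = false := by
      simp only [beq_eq_false_iff_ne, ne_eq]; exact fun hh => h (hh ▸ List.mem_cons_self)
    simp only [reSearch, hc, if_pos trivial]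
    rw [reSearch_false_of_no_nl (fun hh => h (List.mem_cons_of_mem _ hh))]

theorem matchAt_append_nl {line : List Char} (h : '\n' ∉ line) (rest : List Char) :
    matchAt (line ++ '\n' :: rest) = matchAt line := by
  unfold matchAt
  rw [List.dropWhile_append]
  cases hd : List.dropWhile isWSChar line with
  | nil =>
    simp only [List.isEmpty_nil, if_true]
    rw [List.dropWhile_cons_of_neg (by decide), List.takeWhile_cons_of_neg (by decide)]
    simp
  | cons e d' =>
    simp only [List.isEmpty_cons, Bool.false_eq_true, if_false]
    have hsubD : ∀ x ∈ e :: d', x ∈ line := fun x hx =>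
      (List.dropWhile_sublist isWSChar).subset (hd ▸ hx)
    rw [List.takeWhile_append, List.dropWhile_append]
    by_cases hfull : (List.takeWhile PySem.Chars.isdigit (e :: d')).length = (e :: d').length
    · have hDall : List.takeWhile PySem.Chars.isdigit (e :: d') = e :: d' :=
        (List.takeWhile_sublist _).eq_of_length hfull
      have hdropD : List.dropWhile PySem.Chars.isdigit (e :: d') = [] := by
        have := List.takeWhile_append_dropWhile
          (p := PySem.Chars.isdigit) (l := e :: d')
        rw [hDall] at this
        simpa using this
      rw [if_pos hfull, hdropD]
      simp only [List.isEmpty_nil, if_true]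
      rw [List.dropWhile_cons_of_neg (by decide), List.takeWhile_cons_of_neg (by decide)]
      rw [hDall]
      simp [List.append_nil, isWSChar]
    · rw [if_neg hfull]
      have hdropD : List.dropWhile PySem.Chars.isdigit (e :: d') ≠ [] := by
        intro hnil
        apply hfull
        have := List.takeWhile_append_dropWhile (p := PySem.Chars.isdigit) (l := e :: d')
        rw [hnil, List.append_nil] at this
        rw [this]
      have : (List.dropWhile PySem.Chars.isdigit (e :: d')).isEmpty = false := by
        simpa [List.isEmpty_iff] using hdropD
      rw [this]
      simp only [Bool.false_eq_true, if_false]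
      obtain ⟨c, tail, hdd⟩ := List.exists_cons_of_ne_nil hdropD
      rw [hdd]
      have htail : '\n' ∉ tail := fun hm => h (hsubD _
        ((List.dropWhile_sublist PySem.Chars.isdigit).subset (hdd ▸ List.mem_cons_of_mem _ hm)))
      cases hts : List.takeWhile PySem.Chars.isdigit (e :: d') with
      | nil => rfl
      | cons f fs =>
        simp only [List.cons_append]
        rw [markerSearch_append_nl htail]

theorem split₀_go_acc (u : List Char) : ∀ cur acc,
    PySem.Chars.split₀.go u cur acc = acc.reverse ++ PySem.Chars.split₀.go u cur [] := by
  induction u with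
  | nil =>
    intro cur acc
    simp only [PySem.Chars.split₀.go]
    split <;> simp
  | cons c rest ih =>
    intro cur acc
    simp only [PySem.Chars.split₀.go]
    split
    · split
      · exact ih [] acc
      · rw [ih [] (cur.reverse :: acc), ih [] [cur.reverse]]
        simp
    · exact ih _ acc

theorem split₀_go_allspace {u : List Char} (hu : ∀ c ∈ u, PySem.Chars.isspace c = true) (acc : List (List Char)) :
    PySem.Chars.split₀.go u [] acc = acc.reverse := by
  induction u with
  | nil => simp [PySem.Chars.split₀.go]
  | cons c rest ih =>
    simp only [PySem.Chars.split₀.go, hu c List.mem_cons_self, if_true]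
    simp only [List.isEmpty_nil, if_true]
    exact ih (fun x hx => hu x (List.mem_cons_of_mem _ hx))

theorem split₀_go_token (u : List Char) : ∀ cur, cur ≠ [] →
    ∃ tl, PySem.Chars.split₀.go u cur [] =
      (cur.reverse ++ u.takeWhile (fun c => !PySem.Chars.isspace c)) :: tl := by
  induction u with
  | nil =>
    intro cur hcur
    refine ⟨[], ?_⟩
    simp only [PySem.Chars.split₀.go]
    rw [if_neg (by simpa [List.isEmpty_iff] using hcur)]
    simp
  | cons c rest ih =>
    intro cur hcur
    simp only [PySem.Chars.split₀.go]
    by_cases hs : PySem.Chars.isspace c = true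
    · rw [if_pos hs, if_neg (by simpa [List.isEmpty_iff] using hcur)]
      rw [split₀_go_acc]
      refine ⟨PySem.Chars.split₀.go rest [] [], ?_⟩
      rw [List.takeWhile_cons_of_neg (by simp [hs])]
      simp
    · rw [if_neg hs]
      obtain ⟨tl, htl⟩ := ih (c :: cur) (by simp)
      refine ⟨tl, ?_⟩
      rw [htl, List.takeWhile_cons_of_pos (by simp [hs])]
      simp

theorem split₀_go_wsprefix {w : List Char} (hw : ∀ c ∈ w, PySem.Chars.isspace c = true)
    (v : List Char) (acc : List (List Char)) :
    PySem.Chars.split₀.go (w ++ v) [] acc = PySem.Chars.split₀.go v [] acc := by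
  induction w with
  | nil => rfl
  | cons c w' ih =>
    simp only [List.cons_append, PySem.Chars.split₀.go, hw c List.mem_cons_self, if_true,
      List.isEmpty_nil]
    exact ih (fun x hx => hw x (List.mem_cons_of_mem _ hx))

theorem split₀_of_allspace {l : List Char} (h : List.dropWhile PySem.Chars.isspace l = []) :
    PySem.Chars.split₀ l = [] := by
  rw [PySem.Chars.split₀]
  exact split₀_go_allspace (List.dropWhile_eq_nil_iff.mp h) []

theorem split₀_head {l : List Char} {c0 : Char} {d' : List Char}
    (h : List.dropWhile PySem.Chars.isspace l = c0 :: d') :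
    ∃ tl, PySem.Chars.split₀ l =
      ((c0 :: d').takeWhile (fun c => !PySem.Chars.isspace c)) :: tl := by
  have hc0 : PySem.Chars.isspace c0 = false := by
    have := List.head_dropWhile_not PySem.Chars.isspace (l := l) (by rw [h]; simp)
    simpa [h] using this
  have hsplit : l = List.takeWhile PySem.Chars.isspace l ++ (c0 :: d') := by
    rw [← h, List.takeWhile_append_dropWhile]
  rw [PySem.Chars.split₀]
  nth_rewrite 1 [hsplit]
  rw [split₀_go_wsprefix (fun x hx => List.mem_takeWhile_imp hx)]
  simp only [PySem.Chars.split₀.go, hc0, Bool.false_eq_true, if_false]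
  obtain ⟨tl, htl⟩ := split₀_go_token d' [c0] (by simp)
  refine ⟨tl, ?_⟩
  rw [htl, List.takeWhile_cons_of_pos (by simp [hc0])]
  simp

theorem takeWhile_congr' {p q : Char → Bool} : ∀ {l : List Char}, (∀ c ∈ l, p c = q c) →
    l.takeWhile p = l.takeWhile q
  | [], _ => rfl
  | c :: l, h => by
    simp only [List.takeWhile_cons, h c List.mem_cons_self]
    split <;> simp [takeWhile_congr' (fun x hx => h x (List.mem_cons_of_mem _ hx))]

theorem dropWhile_congr' {p q : Char → Bool} : ∀ {l : List Char}, (∀ c ∈ l, p c = q c) →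
    l.dropWhile p = l.dropWhile q
  | [], _ => rfl
  | c :: l, h => by
    simp only [List.dropWhile_cons, h c List.mem_cons_self]
    split <;> simp [dropWhile_congr' (fun x hx => h x (List.mem_cons_of_mem _ hx))]

theorem digit_not_ws {c : Char} (h : PySem.Chars.isdigit c = true) : isWSChar c = false := by
  by_contra hb
  have hws : isWSChar c = true := by simpa using hb
  rcases (by simpa [isWSChar] using hws : (c = ' ' ∨ c = '\t') ∨ c = '\r') with (rfl | rfl) | rfl <;>
    exact absurd h (by decide)

theorem infix_of_head_notMem {a : Char} {m : List Char} : ∀ {pre suf : List Char},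
    (a :: m) <:+: (pre ++ suf) → a ∉ pre → (a :: m) <:+: suf := by
  intro pre
  induction pre with
  | nil => intro suf h _; simpa using h
  | cons p pre' ih =>
    intro suf h ha
    rw [List.cons_append, List.infix_cons_iff] at h
    rcases h with h | h
    · exact absurd ((List.cons_prefix_cons.mp h).1 ▸ List.mem_cons_self) ha
    · exact ih h (fun hm => ha (List.mem_cons_of_mem _ hm))

theorem matchAt_eq_lineStepA {l : List Char}
    (hws : ∀ c ∈ l, PySem.Chars.isspace c = isWSChar c) :
    matchAt l = lineStepA l := by
  have hnl : '\n' ∉ l := fun hm => absurd (hws _ hm) (by decide)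
  have hmem_d : ∀ c ∈ List.dropWhile isWSChar l, c ∈ l := fun c hc =>
    (List.dropWhile_sublist _).subset hc
  have hdw : List.dropWhile PySem.Chars.isspace l = List.dropWhile isWSChar l :=
    dropWhile_congr' hws
  simp only [matchAt, lineStepA]
  cases hd : List.dropWhile isWSChar l with
  | nil =>
    rw [split₀_of_allspace (by rw [hdw, hd])]
    simp only [List.takeWhile_nil, List.dropWhile_nil]
    split_ifs <;> rfl
  | cons e d' =>
    have hE : PySem.Chars.isspace e = false := by
      have h1 := List.head_dropWhile_not isWSChar (l := l) (by rw [hd]; simp)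
      rw [hws _ (hmem_d e (hd ▸ List.mem_cons_self))]
      simpa [hd] using h1
    obtain ⟨tl, htl⟩ := split₀_head (l := l) (by rw [hdw, hd])
    have hlsplit : l = List.takeWhile PySem.Chars.isspace l ++ (e :: d') := by
      conv_lhs => rw [← List.takeWhile_append_dropWhile (p := PySem.Chars.isspace) (l := l)]
      rw [hdw, hd]
    cases hts : List.takeWhile PySem.Chars.isdigit (e :: d') with
    | nil =>
      -- first token does not start with a digit: both none
      have he : PySem.Chars.isdigit e = false := by
        by_contra hb
        rw [List.takeWhile_cons_of_pos (by simpa using hb)] at hts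
        exact List.cons_ne_nil _ _ hts
      rw [htl]
      rw [List.takeWhile_cons_of_pos (by simp [hE])]
      have : PySem.Chars.strIsdigit (e :: List.takeWhile (fun c => !PySem.Chars.isspace c) d') = false := by
        simp [PySem.Chars.strIsdigit, he]
      simp only [this]
      split_ifs <;> first | rfl | exact (by assumption : False).elim
    | cons f fs =>
      have hef : e = f ∧ PySem.Chars.isdigit e = true := by
        by_cases hb : PySem.Chars.isdigit e = true
        · rw [List.takeWhile_cons_of_pos hb] at hts
          exact ⟨(List.cons.injEq .. ▸ hts).1.symm ▸ rfl, hb⟩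
        · rw [List.takeWhile_cons_of_neg (by simpa using hb)] at hts
          exact absurd hts.symm (List.cons_ne_nil _ _)
      have hds_digit : ∀ x ∈ f :: fs, PySem.Chars.isdigit x = true := fun x hx =>
        List.mem_takeWhile_imp (hts ▸ hx)
      have hDsplit : e :: d' = (f :: fs) ++ List.dropWhile PySem.Chars.isdigit (e :: d') := by
        conv_lhs => rw [← List.takeWhile_append_dropWhile (p := PySem.Chars.isdigit) (l := e :: d')]
        rw [hts]
      cases hdd : List.dropWhile PySem.Chars.isdigit (e :: d') with
      | nil =>
        -- the whole rest of the line is one digit token: no marker, both none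
        have hall : ∀ x ∈ e :: d', PySem.Chars.isdigit x = true := List.dropWhile_eq_nil_iff.mp hdd
        have hf_notmem : 'f' ∉ l := by
          intro hm
          rw [hlsplit] at hm
          rcases List.mem_append.mp hm with hm | hm
          · exact absurd (List.mem_takeWhile_imp hm) (by decide)
          · exact absurd (hall _ hm) (by decide)
        have h1 : PySem.Chars.isIn "files changed".toList l = false := by
          rw [PySem.Chars.isIn_eq_false_iff]
          exact fun hinf => hf_notmem (hinf.subset (by decide))
        have h2 : PySem.Chars.isIn "file changed".toList l = false := by
          rw [PySem.Chars.isIn_eq_false_iff]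
          exact fun hinf => hf_notmem (hinf.subset (by decide))
        rw [h1, h2]
        rfl
      | cons c tail =>
        have hc_mem : c ∈ l := hmem_d _ (hd ▸ (by
          rw [hDsplit, hdd]
          exact List.mem_append.mpr (Or.inr List.mem_cons_self)))
        have hc_nd : PySem.Chars.isdigit c = false := by
          have h1 := List.head_dropWhile_not PySem.Chars.isdigit (l := e :: d') (by rw [hdd]; simp)
          simpa [hdd] using h1
        have htail_mem : ∀ x ∈ tail, x ∈ l := fun x hx => hmem_d _ (hd ▸ (by
          rw [hDsplit, hdd]
          exact List.mem_append.mpr (Or.inr (List.mem_cons_of_mem _ hx))))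
        have htail_nl : '\n' ∉ tail := fun hm => hnl (htail_mem _ hm)
        -- A's first token, written with isWSChar
        have htok : List.takeWhile (fun x => !PySem.Chars.isspace x) (e :: d') =
            (f :: fs) ++ List.takeWhile (fun x => !isWSChar x) (c :: tail) := by
          rw [takeWhile_congr' (p := fun x => !PySem.Chars.isspace x) (q := fun x => !isWSChar x)
            (fun x hx => by simp [hws x (hmem_d x (hd ▸ hx))])]
          conv_lhs => rw [hDsplit, hdd]
          rw [List.takeWhile_append]
          rw [if_pos (by rw [List.takeWhile_eq_self_iff.mpr
            (fun x hx => by simp [digit_not_ws (hds_digit x hx)])])]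
        by_cases hcws : isWSChar c = true
        · -- digits then whitespace: the real match; both test the marker
          have htok2 : List.takeWhile (fun x => !PySem.Chars.isspace x) (e :: d') = f :: fs := by
            rw [htok, List.takeWhile_cons_of_neg (by simp [hcws]), List.append_nil]
          have hsd : PySem.Chars.strIsdigit (f :: fs) = true := by
            simp only [PySem.Chars.strIsdigit]
            simp [List.all_eq_true.mpr hds_digit]
          have hpre : l = (List.takeWhile PySem.Chars.isspace l ++ (f :: fs) ++ [c]) ++ tail := by
            conv_lhs => rw [hlsplit, hDsplit, hdd]
            simp
          have hmarker : ∀ M : List Char, M = 'f' :: M.tail → M ≠ [] →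
              (PySem.Chars.isIn M l = PySem.Chars.isIn M tail) := by
            intro M hM _
            rw [Bool.eq_iff_iff, PySem.Chars.isIn_iff_infix, PySem.Chars.isIn_iff_infix]
            constructor
            · intro hinf
              rw [hpre] at hinf
              rw [hM] at hinf ⊢
              refine infix_of_head_notMem hinf ?_
              intro hm
              rcases List.mem_append.mp hm with hm | hm
              · rcases List.mem_append.mp hm with hm | hm
                · exact absurd (List.mem_takeWhile_imp hm) (by decide)
                · exact absurd (hds_digit _ hm) (by decide)
              · have hcf : c = 'f' := (List.mem_singleton.mp hm).symm
                exact absurd (hcf ▸ hcws) (by decide)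
            · intro hinf
              refine hinf.trans ?_
              rw [hpre]
              exact (List.suffix_append _ _).isInfix
          rw [htl, htok2]
          rw [hmarker _ (by decide) (by decide), hmarker _ (by decide) (by decide)]
          have hms := markerSearch_eq_isIn htail_nl
          change (if (isWSChar c && markerSearch tail) = true
              then some ((PySem.Int.ofChars? (f :: fs)).getD 0) else none) = _
          rcases Bool.eq_false_or_eq_true (PySem.Chars.isIn "files changed".toList tail) with h1 | h1 <;>
            rcases Bool.eq_false_or_eq_true (PySem.Chars.isIn "file changed".toList tail) with h2 | h2 <;>
            (rw [hms, h1, h2]; simp [hcws, hsd])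
        · -- digits then a non-space, non-digit char: token not all digits, no match
          have htok2 : List.takeWhile (fun x => !PySem.Chars.isspace x) (e :: d') =
              (f :: fs) ++ c :: List.takeWhile (fun x => !isWSChar x) tail := by
            rw [htok, List.takeWhile_cons_of_pos (by simp [hcws])]
          have hsd : PySem.Chars.strIsdigit (f :: (fs ++ c :: List.takeWhile (fun x => !isWSChar x) tail)) = false := by
            simp only [PySem.Chars.strIsdigit, Bool.and_eq_false_iff]
            right
            rw [List.all_eq_false]
            exact ⟨c, List.mem_cons_of_mem _ (List.mem_append.mpr (Or.inr List.mem_cons_self)),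
              by simp [hc_nd]⟩
          have hcws' : isWSChar c = false := by simpa using hcws
          rw [htl, htok2]
          simp [hsd, hcws']


theorem dom_isspace_eq_isWSChar {c : Char} (h : pvDomChar c = true) (hne : c ≠ '\n') :
    PySem.Chars.isspace c = isWSChar c := by
  by_cases h32 : c.toNat = 32
  · have : c = ' ' := by rw [← Char.ofNat_toNat c, h32]
    subst this; decide
  by_cases h9 : c.toNat = 9
  · have : c = '\t' := by rw [← Char.ofNat_toNat c, h9]
    subst this; decide
  by_cases h13 : c.toNat = 13
  · have : c = '\r' := by rw [← Char.ofNat_toNat c, h13]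
    subst this; decide
  have h10 : c.toNat ≠ 10 := fun hh => hne (by rw [← Char.ofNat_toNat c, hh])
  have hdom : ((32 ≤ c.toNat ∧ c.toNat ≤ 126 ∨ c.toNat = 9) ∨ c.toNat = 10) ∨ c.toNat = 13 := by
    simpa [pvDomChar] using h
  have hs : PySem.Chars.isspace c = false := by
    simp only [PySem.Chars.isspace]
    simp only [Bool.or_eq_false_iff, Bool.and_eq_false_iff]
    refine ⟨⟨⟨⟨⟨⟨⟨⟨⟨⟨⟨?_, ?_⟩, ?_⟩, ?_⟩, ?_⟩, ?_⟩, ?_⟩, ?_⟩, ?_⟩, ?_⟩, ?_⟩, ?_⟩ <;>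
      simp <;> omega
  have hw : isWSChar c = false := by
    simp only [isWSChar, Bool.or_eq_false_iff, beq_eq_false_iff_ne, ne_eq]
    refine ⟨⟨fun hc => h32 (by rw [hc]; rfl), fun hc => h9 (by rw [hc]; rfl)⟩,
      fun hc => h13 (by rw [hc]; rfl)⟩
  rw [hs, hw]

-- A's whole loop at char level
def goAC : List (List Char) → Int
  | [] => 0
  | l :: ls => match lineStepA l with | some v => v | none => goAC ls

theorem countGo_eq_goAC (L : List (List Char)) :
    countGitChangesGo (L.map String.ofList) = goAC L := by
  induction L with
  | nil => rfl
  | cons l ls ih =>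
    simp only [List.map_cons, countGitChangesGo, goAC, lineStepA,
      PySem.Str.isIn, PySem.Str.split₀, PySem.Str.strIsdigit, PySem.Int.ofStr?,
      String.toList_ofList]
    cases hs : PySem.Chars.split₀ l with
    | nil => simp [ih]
    | cons p ps =>
      simp only [List.map_cons]
      split_ifs <;> simp_all

theorem reSearch_interNL : ∀ {L : List (List Char)}, L ≠ [] → (∀ l ∈ L, '\n' ∉ l) →
    reSearch (interNL L) true = firstMatch L := by
  intro L
  induction L with
  | nil => intro h; exact absurd rfl h
  | cons l ls ih =>
    intro _ hnl
    cases ls with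
    | nil =>
      show reSearch (interNL [l]) true = firstMatch [l]
      rw [show interNL [l] = l from rfl,
        reSearch_true_no_nl (hnl l List.mem_cons_self)]
      rfl
    | cons m ms =>
      rw [interNL_cons_cons, reSearch_true_append_nl (hnl l List.mem_cons_self),
        matchAt_append_nl (hnl l List.mem_cons_self)]
      rw [ih (List.cons_ne_nil _ _) (fun x hx => hnl x (List.mem_cons_of_mem _ hx))]
      rfl

theorem goAC_eq_firstMatch {L : List (List Char)}
    (hws : ∀ l ∈ L, ∀ c ∈ l, PySem.Chars.isspace c = isWSChar c) :
    goAC L = match firstMatch L with | some n => n | none => 0 := by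
  induction L with
  | nil => rfl
  | cons l ls ih =>
    simp only [goAC, firstMatch, ← matchAt_eq_lineStepA (hws l List.mem_cons_self)]
    cases matchAt l with
    | none => simpa using ih (fun x hx => hws x (List.mem_cons_of_mem _ hx))
    | some n => rfl

-- ===== VERDICT (by name: the statement is the Claim_ definition above) =====
theorem count_git_changes_py_spec : Claim_equal_count_git_changes_py := by
  intro s hdom
  unfold Spec_count_git_changes_py count_git_changes_py count_git_changes_py_alt
  have hdomc : ∀ c ∈ s.toList, pvDomChar c = true := by
    simpa [Dom_count_git_changes_py, pvDomStr, List.all_eq_true] using hdom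
  have hsplit : (PySem.Str.split? s "\n").getD [] = (linesOf s.toList).map String.ofList := by
    rw [PySem.Str.split?]
    rw [show ("\n" : String).toList = ['\n'] from rfl]
    rw [PySem.Chars.split?]
    rw [if_neg (by simp)]
    simp [splitOn_newline]
  rw [hsplit, countGo_eq_goAC]
  have hB : reSearch s.toList true = firstMatch (linesOf s.toList) := by
    conv_lhs => rw [← interNL_linesOf s.toList]
    exact reSearch_interNL (linesOf_ne_nil _) (fun l hl => not_nl_mem_linesOf hl)
  rw [hB]
  exact goAC_eq_firstMatch (fun l hl c hc =>
    dom_isspace_eq_isWSChar (hdomc c (mem_of_mem_linesOf hl hc))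
      (fun hcn => not_nl_mem_linesOf hl (hcn ▸ hc)))
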